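-- pv_equiv track=rewrite | github.com/Kenshi2358/misc | data_analysis/analyze_table.py | determine_column_name
-- ===== SOURCE A (Python) =====
-- def determine_column_name(all_columns_dictionary: dict, name_list: list):
--     """
--     Determine the column name using the name_list and searching among all_columns_dictionary.
--     """
--
--     name_guess = ''
--
--     # Check for the name using an exact match.
--     end_loops = False
--     for each_column in all_columns_dictionary:
--
--         if end_loops == True:
--             break
--
--         for each_word in name_list:
--
--             if each_column == each_word:
--                 name_guess = each_column
--                 end_loops = True
--                 break # Found an exact match. End both loops.
--
--     # If still not found, check using a contains match.
--     end_loops = False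
--     if name_guess == '':
--
--         for each_column in all_columns_dictionary:
--
--             if end_loops == True:
--                 break
--
--             for each_word in name_list:
--
--                 if each_column.find(each_word) >= 0:
--                     name_guess = each_column
--                     end_loops = True
--                     break # Found a contains match. End both loops.
--
--     # If no name is found, return null string.
--     if name_guess == '':
--         name_guess = 'null'
--
--     return name_guess
-- ===== SOURCE B (Python) =====
-- def determine_column_name(all_columns_dictionary: dict, name_list: list):
--     """Single pass over the columns, recording the first exact match and the
--     first substring match in two slots, then choosing between them."""
--     exact_guess = ''
--     found_exact = False
--     contains_guess = ''
--     found_contains = False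
--     for column in all_columns_dictionary:
--         if not found_exact and column in name_list:
--             exact_guess = column
--             found_exact = True
--         if not found_contains and any(word in column for word in name_list):
--             contains_guess = column
--             found_contains = True
--     name_guess = exact_guess if exact_guess != '' else contains_guess
--     return name_guess if name_guess != '' else 'null'
-- ===== Notes on version B (the rewrite author's own statement) =====
-- stated objective: alternative
-- what changed: Replaces A's two sequential column scans with break flags by one pass over the columns that records the first exact match and the first substring match in two slots and chooses between them afterwards.
import Mathlib
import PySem

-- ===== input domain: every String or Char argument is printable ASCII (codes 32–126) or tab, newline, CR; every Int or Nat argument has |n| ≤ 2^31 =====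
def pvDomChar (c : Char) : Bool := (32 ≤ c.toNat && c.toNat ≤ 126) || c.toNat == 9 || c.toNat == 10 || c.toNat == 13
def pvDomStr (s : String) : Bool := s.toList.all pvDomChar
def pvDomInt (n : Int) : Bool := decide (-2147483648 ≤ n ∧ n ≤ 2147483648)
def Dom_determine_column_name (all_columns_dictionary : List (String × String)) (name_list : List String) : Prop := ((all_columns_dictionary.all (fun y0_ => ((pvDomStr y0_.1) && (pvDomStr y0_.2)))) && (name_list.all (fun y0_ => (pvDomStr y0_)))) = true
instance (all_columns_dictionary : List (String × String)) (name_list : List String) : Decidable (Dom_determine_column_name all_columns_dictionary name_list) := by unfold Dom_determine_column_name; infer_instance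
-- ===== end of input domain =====

-- B makes one pass over the columns, recording first exact and first substring match, instead of A's two scans; alternative decomposition, same cost.


-- ===== PORT A =====
-- inner loop of A's first pass: 'for each_word in name_list: if each_column == each_word: … break'
def pvAExactHit (c : String) : List String → Bool
  | [] => false
  | w :: ws => if c == w then true else pvAExactHit c ws

-- A's first pass: first column equal to some word ('' if the loop ends without a hit)
def pvAPass1 (cols : List String) (name_list : List String) : String :=
  match cols with
  | [] => ""
  | c :: cs => if pvAExactHit c name_list then c else pvAPass1 cs name_list

-- inner loop of A's second pass: 'if each_column.find(each_word) >= 0: … break'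
def pvAContainsHit (c : String) : List String → Bool
  | [] => false
  | w :: ws => if 0 ≤ PySem.Str.find c w then true else pvAContainsHit c ws

-- A's second pass: first column containing some word ('' if none)
def pvAPass2 (cols : List String) (name_list : List String) : String :=
  match cols with
  | [] => ""
  | c :: cs => if pvAContainsHit c name_list then c else pvAPass2 cs name_list

def determine_column_name (all_columns_dictionary : List (String × String)) (name_list : List String) : String :=
  let cols := (PySem.Dict.ofList all_columns_dictionary).keys
  let g1 := pvAPass1 cols name_list
  let name_guess := if g1 = "" then pvAPass2 cols name_list else g1
  if name_guess = "" then "null" else name_guess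

-- ===== PORT B =====
-- one fold over the columns; state = (exact_guess, found_exact, contains_guess, found_contains)
def pvBStep (name_list : List String) (st : String × Bool × String × Bool) (c : String) : String × Bool × String × Bool :=
  let st1 := if !st.2.1 && name_list.contains c then (c, true, st.2.2.1, st.2.2.2) else st
  if !st1.2.2.2 && name_list.any (fun w => PySem.Str.isIn w c) then (st1.1, st1.2.1, c, true) else st1

def determine_column_name_alt (all_columns_dictionary : List (String × String)) (name_list : List String) : String :=
  let cols := (PySem.Dict.ofList all_columns_dictionary).keys
  let st := cols.foldl (pvBStep name_list) ("", false, "", false)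
  let name_guess := if st.1 ≠ "" then st.1 else st.2.2.1
  if name_guess ≠ "" then name_guess else "null"

-- ===== PRECONDITION & SPEC =====
def Spec_determine_column_name (all_columns_dictionary : List (String × String)) (name_list : List String) (out : String) : Prop := out = determine_column_name_alt all_columns_dictionary name_list
instance (all_columns_dictionary : List (String × String)) (name_list : List String) (out : String) : Decidable (Spec_determine_column_name all_columns_dictionary name_list out) := by unfold Spec_determine_column_name; infer_instance

-- ===== CLAIM (what is proved, stated in full; the proofs are below) =====
def Claim_equal_determine_column_name : Prop := ∀ (all_columns_dictionary : List (String × String)) (name_list : List String), Dom_determine_column_name all_columns_dictionary name_list → Spec_determine_column_name all_columns_dictionary name_list (determine_column_name all_columns_dictionary name_list)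

-- ===== LEMMAS AND PROOFS =====

-- A's exact-hit test is Python's 'column in name_list'
theorem pvAExactHit_eq (c : String) (ws : List String) : pvAExactHit c ws = ws.contains c := by
  induction ws with
  | nil => rfl
  | cons w ws ih => simp [pvAExactHit, ih]

-- A's contains-hit test is Python's 'any(word in column …)'
theorem pvAContainsHit_eq (c : String) (ws : List String) :
    pvAContainsHit c ws = ws.any (fun w => PySem.Str.isIn w c) := by
  induction ws with
  | nil => rfl
  | cons w ws ih =>
    have hiff : (0 ≤ PySem.Chars.find c.toList w.toList) ↔
        PySem.Chars.isIn w.toList c.toList = true := by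
      rw [PySem.Chars.find_nonneg_iff, PySem.Chars.isIn_iff_infix]
    simp only [pvAContainsHit, List.any_cons, ih, PySem.Str.find_eq, PySem.Str.isIn_eq]
    by_cases h : 0 ≤ PySem.Chars.find c.toList w.toList
    · simp [h, hiff.mp h]
    · simp [h, Bool.eq_false_iff.mpr (fun hh => h (hiff.mpr hh))]

-- an exact hit is also a contains hit (a string contains itself)
theorem pvExact_imp_contains (c : String) (nl : List String)
    (h : nl.contains c = true) : nl.any (fun w => PySem.Str.isIn w c) = true := by
  have hm : c ∈ nl := by simpa using h
  refine List.any_eq_true.2 ⟨c, hm, ?_⟩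
  rw [PySem.Str.isIn_iff_infix]

-- once both flags are set, B's step is the identity
theorem pvFold_done (nl : List String) (cols : List String) (e cg : String) :
    cols.foldl (pvBStep nl) (e, true, cg, true) = (e, true, cg, true) := by
  induction cols with
  | nil => rfl
  | cons c cs ih => simp [List.foldl_cons, pvBStep, ih]

-- after a contains hit, only the exact slot can still change, to A's pass-1 value
theorem pvFold_afterContains (nl : List String) (cols : List String) (cg : String) :
    ((cols.foldl (pvBStep nl) ("", false, cg, true)).1 = pvAPass1 cols nl ∧
     (cols.foldl (pvBStep nl) ("", false, cg, true)).2.2.1 = cg) := by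
  induction cols with
  | nil => exact ⟨rfl, rfl⟩
  | cons c cs ih =>
    by_cases h : nl.contains c = true
    · have hm : c ∈ nl := by simpa using h
      have hE : pvAExactHit c nl = true := by rw [pvAExactHit_eq]; exact h
      have hstep : pvBStep nl ("", false, cg, true) c = (c, true, cg, true) := by
        simp [pvBStep, hm]
      rw [List.foldl_cons, hstep, pvFold_done]
      exact ⟨by simp [pvAPass1, hE], rfl⟩
    · simp only [Bool.not_eq_true] at h
      have he' : c ∉ nl := by simpa using h
      have hE : pvAExactHit c nl = false := by rw [pvAExactHit_eq]; exact h
      have hstep : pvBStep nl ("", false, cg, true) c = ("", false, cg, true) := by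
        simp [pvBStep, he']
      rw [List.foldl_cons, hstep]
      obtain ⟨h1, h2⟩ := ih
      exact ⟨by rw [h1]; simp [pvAPass1, hE], h2⟩

-- from the initial state, B's fold computes exactly A's two pass results
theorem pvFold_main (nl : List String) (cols : List String) :
    ((cols.foldl (pvBStep nl) ("", false, "", false)).1 = pvAPass1 cols nl ∧
     (cols.foldl (pvBStep nl) ("", false, "", false)).2.2.1 = pvAPass2 cols nl) := by
  induction cols with
  | nil => exact ⟨rfl, rfl⟩
  | cons c cs ih =>
    by_cases he : nl.contains c = true
    · have hm : c ∈ nl := by simpa using he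
      have hE : pvAExactHit c nl = true := by rw [pvAExactHit_eq]; exact he
      have hc := pvExact_imp_contains c nl he
      have hC : pvAContainsHit c nl = true := by rw [pvAContainsHit_eq]; exact hc
      have hcw : ∃ x ∈ nl, PySem.Chars.isIn x.toList c.toList = true := by
        simpa [PySem.Str.isIn_eq] using hc
      have hstep : pvBStep nl ("", false, "", false) c = (c, true, c, true) := by
        simp [pvBStep, hm, hcw]
      rw [List.foldl_cons, hstep, pvFold_done]
      exact ⟨by simp [pvAPass1, hE], by simp [pvAPass2, hC]⟩
    · simp only [Bool.not_eq_true] at he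
      have he' : c ∉ nl := by simpa using he
      have hE : pvAExactHit c nl = false := by rw [pvAExactHit_eq]; exact he
      by_cases hc : nl.any (fun w => PySem.Str.isIn w c) = true
      · have hC : pvAContainsHit c nl = true := by rw [pvAContainsHit_eq]; exact hc
        have hcw : ∃ x ∈ nl, PySem.Chars.isIn x.toList c.toList = true := by
          simpa [PySem.Str.isIn_eq] using hc
        have hstep : pvBStep nl ("", false, "", false) c = ("", false, c, true) := by
          simp [pvBStep, he', hcw]
        rw [List.foldl_cons, hstep]
        obtain ⟨h1, h2⟩ := pvFold_afterContains nl cs c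
        exact ⟨by rw [h1]; simp [pvAPass1, hE], by rw [h2]; simp [pvAPass2, hC]⟩
      · simp only [Bool.not_eq_true] at hc
        have hC : pvAContainsHit c nl = false := by rw [pvAContainsHit_eq]; exact hc
        have hc' : ∀ x ∈ nl, PySem.Chars.isIn x.toList c.toList = false := by
          simpa [PySem.Str.isIn_eq] using hc
        have hstep : pvBStep nl ("", false, "", false) c = ("", false, "", false) := by
          simp [pvBStep, he']
          exact hc'
        rw [List.foldl_cons, hstep]
        obtain ⟨h1, h2⟩ := ih
        exact ⟨by rw [h1]; simp [pvAPass1, hE], by rw [h2]; simp [pvAPass2, hC]⟩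

-- ===== VERDICT (by name: the statement is the Claim_ definition above) =====
theorem determine_column_name_spec : Claim_equal_determine_column_name := by
  intro d nl _
  unfold Spec_determine_column_name determine_column_name determine_column_name_alt
  obtain ⟨h1, h2⟩ := pvFold_main nl (PySem.Dict.ofList d).keys
  simp only [h1, h2]
  by_cases hg : pvAPass1 (PySem.Dict.ofList d).keys nl = "" <;> simp [hg]
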